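-- pv_equiv track=rewrite | github.com/DeveloperDaniell/Python_1 | erikoismerkit.py | jaa_merkkeihin
-- ===== SOURCE A (Python) =====
-- import string
--
-- def jaa_merkkeihin(merkkijono: str):
--     osat = ([], [], [])
--     for merkki in merkkijono:
--         if merkki in string.ascii_letters:
--             osat[0].append(merkki)
--         elif merkki in string.punctuation:
--             osat[1].append(merkki)
--         else:
--             osat[2].append(merkki)
--
--     # Muuntaa listat merkkijonoiksi ja palauttaa ne tupleena
--     return ("".join(osat[0]), "".join(osat[1]), "".join(osat[2]))
-- ===== SOURCE B (Python) =====
-- import string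
--
-- def jaa_merkkeihin(merkkijono: str):
--     letters = "".join(c for c in merkkijono if c in string.ascii_letters)
--     punctuation = "".join(c for c in merkkijono if c in string.punctuation)
--     other = "".join(c for c in merkkijono
--                     if c not in string.ascii_letters and c not in string.punctuation)
--     return (letters, punctuation, other)
-- ===== Notes on version B (the rewrite author's own statement) =====
-- stated objective: idiomatic
-- what changed: Replaces the single classify-and-append loop over a triple of mutable lists with three independent filtering comprehensions, one per output string, joined directly.
import Mathlib
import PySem

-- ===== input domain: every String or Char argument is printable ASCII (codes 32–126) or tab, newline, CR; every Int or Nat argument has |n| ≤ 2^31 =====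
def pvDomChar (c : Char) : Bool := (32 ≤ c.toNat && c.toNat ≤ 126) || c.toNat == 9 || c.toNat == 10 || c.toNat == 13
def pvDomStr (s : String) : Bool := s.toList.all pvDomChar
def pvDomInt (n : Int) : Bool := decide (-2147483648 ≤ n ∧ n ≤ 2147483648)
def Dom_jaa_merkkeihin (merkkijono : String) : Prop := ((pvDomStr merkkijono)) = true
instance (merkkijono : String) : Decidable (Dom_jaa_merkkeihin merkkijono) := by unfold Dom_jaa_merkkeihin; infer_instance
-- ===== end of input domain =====

-- B changes the decomposition: three independent filtering passes (one per output string) instead of A's single classify-and-append loop; same cost, more idiomatic.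

-- ===== PORT A =====
-- membership in string.ascii_letters / string.punctuation, shared by both ports
def pyIsAsciiLetter (c : Char) : Bool :=
  (97 ≤ c.toNat && c.toNat ≤ 122) || (65 ≤ c.toNat && c.toNat ≤ 90)
def pyIsPunct (c : Char) : Bool :=
  (33 ≤ c.toNat && c.toNat ≤ 47) || (58 ≤ c.toNat && c.toNat ≤ 64) ||
  (91 ≤ c.toNat && c.toNat ≤ 96) || (123 ≤ c.toNat && c.toNat ≤ 126)

def jaa_merkkeihin (merkkijono : String) : String × String × String :=
  let osat := merkkijono.toList.foldl
    (fun (osat : List Char × List Char × List Char) merkki =>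
      if pyIsAsciiLetter merkki then (osat.1 ++ [merkki], osat.2.1, osat.2.2)
      else if pyIsPunct merkki then (osat.1, osat.2.1 ++ [merkki], osat.2.2)
      else (osat.1, osat.2.1, osat.2.2 ++ [merkki]))
    ([], [], [])
  (String.ofList osat.1, String.ofList osat.2.1, String.ofList osat.2.2)

-- ===== PORT B =====
def jaa_merkkeihin_alt (merkkijono : String) : String × String × String :=
  (String.ofList (merkkijono.toList.filter pyIsAsciiLetter),
   String.ofList (merkkijono.toList.filter pyIsPunct),
   String.ofList (merkkijono.toList.filter
     (fun c => !pyIsAsciiLetter c && !pyIsPunct c)))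

-- ===== PRECONDITION & SPEC =====
def Spec_jaa_merkkeihin (merkkijono : String) (out : String × String × String) : Prop := out = jaa_merkkeihin_alt merkkijono
instance (merkkijono : String) (out : String × String × String) : Decidable (Spec_jaa_merkkeihin merkkijono out) := by unfold Spec_jaa_merkkeihin; infer_instance

-- ===== CLAIM (what is proved, stated in full; the proofs are below) =====
def Claim_equal_jaa_merkkeihin : Prop := ∀ (merkkijono : String), Dom_jaa_merkkeihin merkkijono → Spec_jaa_merkkeihin merkkijono (jaa_merkkeihin merkkijono)

-- ===== LEMMAS AND PROOFS =====

-- a letter is never punctuation, so A's elif and B's plain punctuation filter agree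
theorem letter_not_punct (c : Char) (h : pyIsAsciiLetter c = true) : pyIsPunct c = false := by
  simp [pyIsAsciiLetter] at h
  simp [pyIsPunct]
  omega

-- loop invariant: A's fold appends exactly B's three filters to the accumulator
theorem fold_eq_filters (cs : List Char) (a b d : List Char) :
    cs.foldl
      (fun (osat : List Char × List Char × List Char) merkki =>
        if pyIsAsciiLetter merkki then (osat.1 ++ [merkki], osat.2.1, osat.2.2)
        else if pyIsPunct merkki then (osat.1, osat.2.1 ++ [merkki], osat.2.2)
        else (osat.1, osat.2.1, osat.2.2 ++ [merkki]))
      (a, b, d)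
    = (a ++ cs.filter pyIsAsciiLetter,
       b ++ cs.filter pyIsPunct,
       d ++ cs.filter (fun c => !pyIsAsciiLetter c && !pyIsPunct c)) := by
  induction cs generalizing a b d with
  | nil => simp
  | cons c cs ih =>
    by_cases hl : pyIsAsciiLetter c = true
    · simp [List.foldl, hl, letter_not_punct c hl, ih]
    · by_cases hp : pyIsPunct c = true
      · simp [List.foldl, hl, hp, ih]
      · simp [List.foldl, hl, hp, ih]

-- ===== VERDICT (by name: the statement is the Claim_ definition above) =====
theorem jaa_merkkeihin_spec : Claim_equal_jaa_merkkeihin := by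
  intro s _
  unfold Spec_jaa_merkkeihin jaa_merkkeihin jaa_merkkeihin_alt
  simp [fold_eq_filters]
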